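-- pv_equiv track=rewrite | github.com/goldenrockefeller/fft-prototype | fft_prototype.py | get_off_diagonal_streaks
-- ===== SOURCE A (Python) =====
-- def get_off_diagonal_streaks(transpose_pairs):
--     streaks = []
--     counter = 0
--     for pair in transpose_pairs:
--         if pair[0][0] == pair[1][0]:
--             if counter != 0:
--                 if counter != 1:
--                     streaks.append(counter)
--                 counter = 0
--         else:
--             counter += 1
--
--     return streaks
-- ===== SOURCE B (Python) =====
-- def get_off_diagonal_streaks(transpose_pairs):
--     # Phase 1: run-length encode the pairs by whether they are diagonal.
--     runs = []
--     for pair in transpose_pairs: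
--         k = pair[0][0] == pair[1][0]
--         if runs and runs[-1][0] == k:
--             runs[-1][1] += 1
--         else:
--             runs.append([k, 1])
--     # Phase 2: keep lengths of off-diagonal runs of length >= 2, except a
--     # trailing run (never flushed).
--     return [n for k, n in runs[:-1] if not k and n >= 2]
-- ===== Notes on version B (the rewrite author's own statement) =====
-- stated objective: alternative
-- what changed: Replaced the single-pass counter/flush state machine by a two-phase algorithm: run-length encode the pairs by diagonality, then a comprehension keeps lengths >= 2 of off-diagonal runs, dropping the trailing run (which A never flushes).
import Mathlib
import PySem

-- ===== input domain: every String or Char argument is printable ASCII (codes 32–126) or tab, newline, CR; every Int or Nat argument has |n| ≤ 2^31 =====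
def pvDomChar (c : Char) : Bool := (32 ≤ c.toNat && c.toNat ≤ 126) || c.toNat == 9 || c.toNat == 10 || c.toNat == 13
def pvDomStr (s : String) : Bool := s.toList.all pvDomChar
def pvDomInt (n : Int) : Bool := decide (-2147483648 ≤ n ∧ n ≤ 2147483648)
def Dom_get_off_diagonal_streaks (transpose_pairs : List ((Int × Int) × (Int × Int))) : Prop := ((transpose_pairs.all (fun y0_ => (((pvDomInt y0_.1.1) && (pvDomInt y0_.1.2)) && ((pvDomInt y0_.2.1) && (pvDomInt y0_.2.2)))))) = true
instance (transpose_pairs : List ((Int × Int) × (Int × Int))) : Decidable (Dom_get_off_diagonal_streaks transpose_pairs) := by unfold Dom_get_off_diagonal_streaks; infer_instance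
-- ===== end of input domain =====

-- B replaces A's counter/flush state machine by run-length encoding plus a
-- comprehension over the runs (same O(n) cost, different decomposition).


-- ===== PORT A =====
-- loop body of A: state = (streaks, counter)
def pvStepA (st : List Int × Int) (pair : (Int × Int) × (Int × Int)) : List Int × Int :=
  if pair.1.1 == pair.2.1 then
    if st.2 ≠ 0 then
      if st.2 ≠ 1 then (st.1 ++ [st.2], 0) else (st.1, 0)
    else st
  else (st.1, st.2 + 1)

def get_off_diagonal_streaks (transpose_pairs : List ((Int × Int) × (Int × Int))) : List Int :=
  (transpose_pairs.foldl pvStepA ([], 0)).1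

-- ===== PORT B =====
-- loop body of B's phase 1: extend the last run or start a new one
def pvStepRun (runs : List (Bool × Int)) (pair : (Int × Int) × (Int × Int)) : List (Bool × Int) :=
  let k := pair.1.1 == pair.2.1
  match runs.getLast? with
  | some last =>
      if last.1 == k then runs.dropLast ++ [(last.1, last.2 + 1)]
      else runs ++ [(k, 1)]
  | none => [(k, 1)]

def get_off_diagonal_streaks_alt (transpose_pairs : List ((Int × Int) × (Int × Int))) : List Int :=
  let runs := transpose_pairs.foldl pvStepRun []
  (runs.dropLast.filter (fun r => !r.1 && decide (2 ≤ r.2))).map (·.2)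

-- ===== PRECONDITION & SPEC =====
def Spec_get_off_diagonal_streaks (transpose_pairs : List ((Int × Int) × (Int × Int))) (out : List Int) : Prop := out = get_off_diagonal_streaks_alt transpose_pairs
instance (transpose_pairs : List ((Int × Int) × (Int × Int))) (out : List Int) : Decidable (Spec_get_off_diagonal_streaks transpose_pairs out) := by unfold Spec_get_off_diagonal_streaks; infer_instance

-- ===== CLAIM (what is proved, stated in full; the proofs are below) =====
def Claim_equal_get_off_diagonal_streaks : Prop := ∀ (transpose_pairs : List ((Int × Int) × (Int × Int))), Dom_get_off_diagonal_streaks transpose_pairs → Spec_get_off_diagonal_streaks transpose_pairs (get_off_diagonal_streaks transpose_pairs)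

-- ===== LEMMAS AND PROOFS =====

-- A's streaks as a function of B's run list so far
def pvOut (r : List (Bool × Int)) : List Int :=
  (r.dropLast.filter (fun x => !x.1 && decide (2 ≤ x.2))).map (·.2)

-- A's counter as a function of B's run list so far
def pvCnt (r : List (Bool × Int)) : Int :=
  match r.getLast? with
  | some (false, n) => n
  | _ => 0

lemma pvStepRun_pos (r : List (Bool × Int)) (p : (Int × Int) × (Int × Int))
    (h : ∀ x ∈ r, 1 ≤ x.2) : ∀ x ∈ pvStepRun r p, 1 ≤ x.2 := by
  rcases r.eq_nil_or_concat with rfl | ⟨r₀, a, rfl⟩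
  · simp [pvStepRun]
  · simp only [List.concat_eq_append] at h ⊢
    have hL : (r₀ ++ [a]).getLast? = some a := by simp
    simp only [pvStepRun, hL]
    have ha : 1 ≤ a.2 := h a (by simp)
    split_ifs with hk
    · intro x hx
      simp only [List.dropLast_concat] at hx
      rcases List.mem_append.1 hx with hx | hx
      · exact h x (List.mem_append.2 (Or.inl hx))
      · simp at hx; subst hx; simp; omega
    · intro x hx
      rcases List.mem_append.1 hx with hx | hx
      · exact h x hx
      · simp at hx; subst hx; simp

lemma step_eq (r : List (Bool × Int)) (h : ∀ x ∈ r, 1 ≤ x.2)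
    (p : (Int × Int) × (Int × Int)) :
    pvStepA (pvOut r, pvCnt r) p = (pvOut (pvStepRun r p), pvCnt (pvStepRun r p)) := by
  rcases r.eq_nil_or_concat with rfl | ⟨r₀, a, rfl⟩
  · by_cases hk : (p.1.1 == p.2.1) = true <;>
      simp [pvStepA, pvStepRun, pvOut, pvCnt, hk]
  · obtain ⟨b, n⟩ := a
    simp only [List.concat_eq_append] at h ⊢
    have hn : 1 ≤ n := by simpa using h (b, n) (by simp)
    have hL : (r₀ ++ [(b, n)]).getLast? = some (b, n) := by simp
    by_cases hk : (p.1.1 == p.2.1) = true <;> cases b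
    · -- last run off-diagonal, current pair diagonal: A flushes, B closes the run
      have hbk : ((false : Bool) == (p.1.1 == p.2.1)) = false := by simp [hk]
      simp only [pvStepRun, hL, hbk, Bool.false_eq_true, if_false]
      by_cases h2 : (2 : Int) ≤ n
      · have hne1 : ¬ n = 1 := by omega
        have hne0 : ¬ n = 0 := by omega
        simp [pvStepA, pvOut, pvCnt, hk, hne0, hne1, List.filter_append, h2]
      · have he1 : n = 1 := by omega
        subst he1
        simp [pvStepA, pvOut, pvCnt, hk, List.filter_append]
    · -- last run diagonal, current pair diagonal: counter 0, run extended
      have hbk : ((true : Bool) == (p.1.1 == p.2.1)) = true := by simp [hk]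
      simp [pvStepA, pvStepRun, hL, pvOut, pvCnt, hk]
    · -- last run off-diagonal, current pair off-diagonal: run extended, counter +1
      have hbk : ((false : Bool) == (p.1.1 == p.2.1)) = true := by simp [hk]
      simp [pvStepA, pvStepRun, hL, pvOut, pvCnt, hk]
    · -- last run diagonal, current pair off-diagonal: new run of length 1
      have hbk : ((true : Bool) == (p.1.1 == p.2.1)) = false := by simp [hk]
      simp [pvStepA, pvStepRun, hL, pvOut, pvCnt, hk, List.filter_append]

lemma fold_inv (tp : List ((Int × Int) × (Int × Int))) :
    ∀ (r : List (Bool × Int)), (∀ x ∈ r, 1 ≤ x.2) →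
    tp.foldl pvStepA (pvOut r, pvCnt r) =
      (pvOut (tp.foldl pvStepRun r), pvCnt (tp.foldl pvStepRun r)) := by
  induction tp with
  | nil => intro r _; simp
  | cons p tp ih =>
      intro r hr
      simp only [List.foldl_cons]
      rw [step_eq r hr p]
      exact ih _ (pvStepRun_pos r p hr)

-- ===== VERDICT (by name: the statement is the Claim_ definition above) =====
theorem get_off_diagonal_streaks_spec : Claim_equal_get_off_diagonal_streaks := by
  intro tp _
  unfold Spec_get_off_diagonal_streaks get_off_diagonal_streaks get_off_diagonal_streaks_alt
  have h := fold_inv tp [] (by simp)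
  simp only [pvOut, pvCnt, List.dropLast_nil, List.filter_nil, List.map_nil,
    List.getLast?_nil] at h
  rw [h]
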